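-- pv_equiv track=rewrite | github.com/Kwpolska/adventofcode | 2017/day04_is_that_really_so_simple.py | solve
-- ===== SOURCE A (Python) =====
-- def solve(data):
--     count = 0
--     for line in data.split('\n'):
--         # PART 1
--         # line_l = line.split()
--         # PART 2
--         line_l = [frozenset(i) for i in line.split()]
--         line_s = set(line_l)
--         if len(line_l) == len(line_s):
--             count += 1
--     return count
-- ===== SOURCE B (Python) =====
-- def solve(data):
--     count = 0
--     for line in data.split('\n'):
--         # canonical key of frozenset(word): its distinct characters in sorted order
--         keys = sorted(''.join(sorted(set(w))) for w in line.split())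
--         # after sorting, any duplicate key is adjacent to an equal neighbour
--         if all(a != b for a, b in zip(keys, keys[1:])):
--             count += 1
--     return count
-- ===== Notes on version B (the rewrite author's own statement) =====
-- stated objective: alternative
-- what changed: Per line, instead of building a set of the frozenset keys and comparing sizes, B sorts canonical (sorted distinct characters) keys and scans once for an adjacent equal pair.
import Mathlib
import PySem

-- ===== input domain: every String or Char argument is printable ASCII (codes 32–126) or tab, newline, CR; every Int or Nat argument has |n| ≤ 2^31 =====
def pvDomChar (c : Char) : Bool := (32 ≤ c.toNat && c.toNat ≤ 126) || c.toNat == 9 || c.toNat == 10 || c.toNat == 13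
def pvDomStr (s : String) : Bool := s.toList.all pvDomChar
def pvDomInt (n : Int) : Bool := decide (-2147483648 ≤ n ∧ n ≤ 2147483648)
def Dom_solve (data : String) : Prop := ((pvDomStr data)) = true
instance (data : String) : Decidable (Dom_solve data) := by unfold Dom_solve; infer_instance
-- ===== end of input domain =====

-- B replaces A's set-of-frozensets size comparison per line by sorting canonical keys and
-- scanning once for an adjacent equal pair (objective: alternative decomposition, similar cost).

-- ===== PORT A =====
-- frozenset(w) is represented canonically as its distinct characters in sorted order,
-- so structural equality of representatives coincides with Python's frozenset equality.
def canonFS (w : List Char) : List Char :=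
  PySem.List.sorted (PySem.Set.ofList w) (fun x => x) false

def solve (data : String) : Int :=
  (PySem.Chars.splitOn data.toList ['\n']).foldl (fun count line =>
    let line_l := (PySem.Chars.split₀ line).map (fun w => canonFS w)
    let line_s := PySem.Set.ofList line_l
    if line_l.length = line_s.length then count + 1 else count) 0

-- ===== PORT B =====
-- all(a != b for a, b in zip(keys, keys[1:]))
def allDiffAdjacent : List (List Char) → Bool
  | [] => true
  | [_] => true
  | a :: b :: t => a ≠ b && allDiffAdjacent (b :: t)

def solve_alt (data : String) : Int :=
  (PySem.Chars.splitOn data.toList ['\n']).foldl (fun count line =>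
    let keys := PySem.List.sorted
      ((PySem.Chars.split₀ line).map (fun w =>
        PySem.List.sorted (PySem.Set.ofList w) (fun x => x) false))
      (fun x => x) false
    if allDiffAdjacent keys then count + 1 else count) 0

-- ===== PRECONDITION & SPEC =====
def Spec_solve (data : String) (out : Int) : Prop := out = solve_alt data
instance (data : String) (out : Int) : Decidable (Spec_solve data out) := by unfold Spec_solve; infer_instance

-- ===== CLAIM (what is proved, stated in full; the proofs are below) =====
def Claim_equal_solve : Prop := ∀ (data : String), Dom_solve data → Spec_solve data (solve data)

-- ===== LEMMAS AND PROOFS =====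

theorem length_add_le {α : Type} [BEq α] (s : PySem.Set α) (x : α) :
    (PySem.Set.add s x).length ≤ s.length + 1 := by
  simp only [PySem.Set.add]; split <;> simp

theorem length_foldl_add_le {α : Type} [BEq α] (t : List α) (s : PySem.Set α) :
    (t.foldl PySem.Set.add s).length ≤ s.length + t.length := by
  induction t generalizing s with
  | nil => simp
  | cons a t ih =>
      simp only [List.foldl_cons, List.length_cons]
      have := ih (PySem.Set.add s a)
      have := length_add_le s a
      omega

theorem add_eq_self_of_mem {α : Type} [BEq α] [LawfulBEq α] (s : PySem.Set α) (x : α)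
    (h : x ∈ s) : PySem.Set.add s x = s := by
  simp only [PySem.Set.add]
  rw [if_pos ((PySem.Set.contains_iff s x).mpr h)]

theorem length_foldl_add_lt {α : Type} [BEq α] [LawfulBEq α] (t : List α) (s : PySem.Set α)
    (h : ¬ t.Nodup ∨ ∃ y ∈ t, y ∈ s) :
    (t.foldl PySem.Set.add s).length < s.length + t.length := by
  induction t generalizing s with
  | nil =>
      rcases h with h | ⟨y, hy, _⟩
      · exact absurd List.nodup_nil h
      · exact absurd hy (List.not_mem_nil)
  | cons a t ih =>
      simp only [List.foldl_cons, List.length_cons]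
      rcases h with h | ⟨y, hy, hys⟩
      · rw [List.nodup_cons] at h
        by_cases hat : a ∈ t
        · have := ih (PySem.Set.add s a)
            (Or.inr ⟨a, hat, (PySem.Set.mem_add s a a).mpr (Or.inr rfl)⟩)
          have := length_add_le s a
          omega
        · have hnt : ¬ t.Nodup := fun hn => h ⟨hat, hn⟩
          have := ih (PySem.Set.add s a) (Or.inl hnt)
          have := length_add_le s a
          omega
      · rcases List.mem_cons.mp hy with rfl | hyt
        · rw [add_eq_self_of_mem s y hys]
          have := length_foldl_add_le t s
          omega
        · have := ih (PySem.Set.add s a)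
            (Or.inr ⟨y, hyt, (PySem.Set.mem_add s a y).mpr (Or.inl hys)⟩)
          have := length_add_le s a
          omega

theorem length_ofList_eq_iff {α : Type} [BEq α] [LawfulBEq α] (l : List α) :
    l.length = (PySem.Set.ofList l).length ↔ l.Nodup := by
  constructor
  · intro h
    by_contra hnd
    have hlt : (PySem.Set.ofList l).length < l.length := by
      have := length_foldl_add_lt (α := α) l [] (Or.inl hnd)
      simpa [PySem.Set.ofList_eq_foldl] using this
    omega
  · intro h
    rw [PySem.Set.ofList_eq_self_of_nodup l h]

theorem allDiff_iff_nodup : ∀ (m : List (List Char)),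
    m.Pairwise (fun a b => a ≤ b) → (allDiffAdjacent m = true ↔ m.Nodup)
  | [] => by simp [allDiffAdjacent]
  | [a] => by simp [allDiffAdjacent]
  | a :: b :: t => by
      intro hp
      have hp' := List.pairwise_cons.mp hp
      have ih := allDiff_iff_nodup (b :: t) hp'.2
      simp only [allDiffAdjacent, Bool.and_eq_true, decide_eq_true_eq, ih,
        List.nodup_cons, List.mem_cons]
      constructor
      · rintro ⟨hab, hnbt⟩
        refine ⟨?_, hnbt⟩
        rintro (rfl | hat)
        · exact hab rfl
        · have hab' : a ≤ b := hp'.1 b List.mem_cons_self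
          have hba : b ≤ a := (List.pairwise_cons.mp hp'.2).1 a hat
          exact hab (le_antisymm hab' hba)
      · rintro ⟨hnm, hnbt⟩
        exact ⟨fun h => hnm (Or.inl h), hnbt⟩

theorem sorted_keys_pairwise (l : List (List Char)) :
    (PySem.List.sorted l (fun x => x) false).Pairwise (fun a b => a ≤ b) := by
  have hinst : (fun (a b : List Char) => a.decidableLT b)
      = (LinearOrder.toDecidableLT : DecidableLT (List Char)) := by
    funext a b; exact Subsingleton.elim _ _
  show (@PySem.List.sorted (List Char) (List Char) List.instLT
      (fun a b => a.decidableLT b) l (fun x => x) false).Pairwise (fun a b => a ≤ b)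
  rw [hinst]
  exact PySem.List.sorted_pairwise l (fun x => x)

theorem line_cond_iff (l : List (List Char)) :
    (l.length = (PySem.Set.ofList l).length) ↔
      allDiffAdjacent (PySem.List.sorted l (fun x => x) false) = true := by
  rw [length_ofList_eq_iff,
    allDiff_iff_nodup _ (sorted_keys_pairwise l),
    (PySem.List.sorted_perm l (fun x => x) false).nodup_iff]

theorem foldls_eq (ls : List (List Char)) : ∀ c : Int,
    ls.foldl (fun count line =>
      let line_l := (PySem.Chars.split₀ line).map (fun w => canonFS w)
      let line_s := PySem.Set.ofList line_l
      if line_l.length = line_s.length then count + 1 else count) c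
    = ls.foldl (fun count line =>
      let keys := PySem.List.sorted
        ((PySem.Chars.split₀ line).map (fun w =>
          PySem.List.sorted (PySem.Set.ofList w) (fun x => x) false))
        (fun x => x) false
      if allDiffAdjacent keys then count + 1 else count) c := by
  induction ls with
  | nil => intro c; rfl
  | cons line rest ih =>
      intro c
      simp only [List.foldl_cons]
      rw [show ((fun w => canonFS w) : List Char → List Char)
            = fun w => PySem.List.sorted (PySem.Set.ofList w) (fun x => x) false
          from rfl]
      rw [if_congr (line_cond_iff _) rfl rfl]
      exact ih _

-- ===== VERDICT (by name: the statement is the Claim_ definition above) =====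
theorem solve_spec : Claim_equal_solve := by
  intro data _
  unfold Spec_solve solve solve_alt
  exact foldls_eq _ 0
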